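-- pv_equiv track=rewrite | github.com/cristian-ruiz-s-ing/numeroscomplejos | numcomplejos.py | dismat
-- ===== SOURCE A (Python) =====
-- def bonito(c2):
--     x=''
--     if int(c2[0])==0:
--         if int(c2[1])==0:
--             x+='0'
--         else:
--             x+=str(c2[1])+'i'
--     else:
--         if int(c2[1])==0:
--             x+=str(c2[0])
--         elif int(c2[1])>0:
--             x+=str(c2[0])+'+'+str(c2[1])+'i'
--         else:
--             x+=str(c2[0])+str(c2[1])+'i'
--     return x
--
-- def sumar(c1,c2):
--     resp=[0,0]
--     resp[0]=int(c1[0])+int(c2[0])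
--     resp[1]=int(c1[1])+int(c2[1])
--     t=(resp[0],resp[1])
--     return t
--
-- def multiplica(c1,c2):
--     resp=[0,0]
--     resp[0]=int(c1[0])*int(c2[0])+((int(c1[1])*int(c2[1]))*-1)
--     resp[1]=int(c1[0])*int(c2[1])+int(c1[1])*int(c2[0])
--     t=(resp[0],resp[1])
--     return t
--
-- def dismat(m1,m2,d1):
--     m1t=[]
--     i=int(d1[0])
--     j=int(d1[1])
--     x=0
--     while x< j:
--         f=[]
--         y=0
--         while y<i:
--             f.append(m1[y][x])
--             y+=1
--         x+=1
--         m1t.append(f)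
--     total=[]
--     for k in range(len(m1t)):
--         for i in range(len(m1t[k])):
--             x=multiplica(m1t[k][i],m2[k][i])
--             total.append(x)
--         while len(total)>1:
--             y=sumar(total[0],total[1])
--             total.pop(0)
--             total.pop(0)
--             total.insert(0,y)
--     return bonito(total[0])
-- ===== SOURCE B (Python) =====
-- def bonito(c2):
--     x=''
--     if int(c2[0])==0:
--         if int(c2[1])==0:
--             x+='0'
--         else:
--             x+=str(c2[1])+'i'
--     else:
--         if int(c2[1])==0:
--             x+=str(c2[0])
--         elif int(c2[1])>0:
--             x+=str(c2[0])+'+'+str(c2[1])+'i'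
--         else:
--             x+=str(c2[0])+str(c2[1])+'i'
--     return x
--
-- def sumar(c1,c2):
--     return (int(c1[0])+int(c2[0]), int(c1[1])+int(c2[1]))
--
-- def multiplica(c1,c2):
--     return (int(c1[0])*int(c2[0])+((int(c1[1])*int(c2[1]))*-1),
--             int(c1[0])*int(c2[1])+int(c1[1])*int(c2[0]))
--
-- def dismat(m1, m2, d1):
--     rows = int(d1[0])
--     cols = int(d1[1])
--     # no explicit transpose: m1t[k][idx] is just m1[idx][k]
--     total = [multiplica(m1[idx][k], m2[k][idx])
--              for k in range(cols) for idx in range(rows)]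
--     acc = total[0]
--     for t in total[1:]:
--         acc = sumar(acc, t)
--     return bonito(acc)
-- ===== Notes on version B (the rewrite author's own statement) =====
-- stated objective: simpler
-- what changed: B drops the explicit transpose-building pass and the pop/pop/insert collapse loop: it produces all products directly via index swap m1[idx][k] in one comprehension and sums them with a plain left fold.
import Mathlib
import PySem

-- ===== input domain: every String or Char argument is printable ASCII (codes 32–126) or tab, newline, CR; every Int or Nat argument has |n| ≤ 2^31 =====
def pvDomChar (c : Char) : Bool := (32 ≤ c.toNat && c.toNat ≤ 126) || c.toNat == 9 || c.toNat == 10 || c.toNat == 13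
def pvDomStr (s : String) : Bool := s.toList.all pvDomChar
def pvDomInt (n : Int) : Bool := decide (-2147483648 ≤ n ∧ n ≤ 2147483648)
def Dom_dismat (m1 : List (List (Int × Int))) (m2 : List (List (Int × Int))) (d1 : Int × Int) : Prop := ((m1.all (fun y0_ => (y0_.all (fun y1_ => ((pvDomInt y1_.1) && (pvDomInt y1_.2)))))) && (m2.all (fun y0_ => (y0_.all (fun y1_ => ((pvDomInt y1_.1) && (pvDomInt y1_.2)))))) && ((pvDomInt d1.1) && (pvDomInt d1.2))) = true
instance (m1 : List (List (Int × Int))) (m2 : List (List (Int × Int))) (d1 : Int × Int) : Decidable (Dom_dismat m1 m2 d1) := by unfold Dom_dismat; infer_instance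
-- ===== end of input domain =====

-- B removes A's explicit transpose-building pass and pop/pop/insert reduction loop,
-- producing the products directly by index swap and summing them with a plain fold (objective: simpler).

-- ===== PORT A =====
-- shared module helpers (used verbatim by both Pythons)
def sumar (c1 c2 : Int × Int) : Int × Int := (c1.1 + c2.1, c1.2 + c2.2)

def multiplica (c1 c2 : Int × Int) : Int × Int :=
  (c1.1 * c2.1 + (c1.2 * c2.2) * (-1), c1.1 * c2.2 + c1.2 * c2.1)

def bonito (c2 : Int × Int) : String :=
  if c2.1 = 0 then
    (if c2.2 = 0 then "" ++ "0" else "" ++ PySem.Int.toStr c2.2 ++ "i")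
  else if c2.2 = 0 then "" ++ PySem.Int.toStr c2.1
  else if c2.2 > 0 then "" ++ PySem.Int.toStr c2.1 ++ "+" ++ PySem.Int.toStr c2.2 ++ "i"
  else "" ++ PySem.Int.toStr c2.1 ++ PySem.Int.toStr c2.2 ++ "i"

-- m[a][b] with PySem indexing; default only reached outside Pre_ (Python raises there)
def getCell (m : List (List (Int × Int))) (a b : Int) : Int × Int :=
  (PySem.List.pyGet? ((PySem.List.pyGet? m a).getD []) b).getD (0, 0)

-- inner 'while y < i' of A's transpose builder
def rowA (m1 : List (List (Int × Int))) (x i y : Int) (f : List (Int × Int)) : List (Int × Int) :=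
  if y < i then rowA m1 x i (y + 1) (f ++ [getCell m1 y x]) else f
termination_by (i - y).toNat
decreasing_by omega

-- outer 'while x < j' of A's transpose builder
def transA (m1 : List (List (Int × Int))) (i j x : Int) (acc : List (List (Int × Int))) :
    List (List (Int × Int)) :=
  if x < j then transA m1 i j (x + 1) (acc ++ [rowA m1 x i 0 []]) else acc
termination_by (j - x).toNat
decreasing_by omega

-- A's 'while len(total)>1: total = sumar(total[0],total[1]) :: total[2:]'
def collapse : List (Int × Int) → List (Int × Int)
  | a :: b :: r => collapse (sumar a b :: r)
  | l => l
termination_by l => l.length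

def dismat (m1 : List (List (Int × Int))) (m2 : List (List (Int × Int))) (d1 : Int × Int) : String :=
  let i := d1.1
  let j := d1.2
  let m1t := transA m1 i j 0 []
  let total := (List.range m1t.length).foldl
    (fun (total : List (Int × Int)) (k : Nat) =>
      let row := (PySem.List.pyGet? m1t (k : Int)).getD []
      let total := (List.range row.length).foldl
        (fun (total : List (Int × Int)) (idx : Nat) =>
          total ++ [multiplica ((PySem.List.pyGet? row (idx : Int)).getD (0, 0))
                               (getCell m2 (k : Int) (idx : Int))]) total
      collapse total) []
  bonito ((PySem.List.pyGet? total 0).getD (0, 0))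

-- ===== PORT B =====
def dismat_alt (m1 : List (List (Int × Int))) (m2 : List (List (Int × Int))) (d1 : Int × Int) : String :=
  let rows := d1.1
  let cols := d1.2
  let total := (PySem.List.pyRange 0 cols 1).flatMap
    (fun k => (PySem.List.pyRange 0 rows 1).map
      (fun idx => multiplica (getCell m1 idx k) (getCell m2 k idx)))
  let acc := (PySem.List.pyGet? total 0).getD (0, 0)
  bonito ((PySem.List.slice total (some 1) none).foldl sumar acc)

-- ===== PRECONDITION & SPEC =====
-- Pre_ excludes exactly the inputs where Python A raises (IndexError): zero/negative
-- dimensions leave 'total' empty, and out-of-range accesses m1[y][x] / m2[k][idx] raise.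
-- (B raises on exactly the same inputs.)
def Pre_dismat (m1 : List (List (Int × Int))) (m2 : List (List (Int × Int))) (d1 : Int × Int) : Prop :=
  0 < d1.1 ∧ 0 < d1.2 ∧
  d1.1.toNat ≤ m1.length ∧ (∀ r ∈ m1.take d1.1.toNat, d1.2.toNat ≤ r.length) ∧
  d1.2.toNat ≤ m2.length ∧ (∀ r ∈ m2.take d1.2.toNat, d1.1.toNat ≤ r.length)
instance (m1 : List (List (Int × Int))) (m2 : List (List (Int × Int))) (d1 : Int × Int) : Decidable (Pre_dismat m1 m2 d1) := by unfold Pre_dismat; infer_instance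

def pvWitness_dismat : (List (List (Int × Int))) × (List (List (Int × Int))) × (Int × Int) :=
  ([[(1, 2)], [(3, -1)]], [[(0, 1), (2, 2)]], (2, 1))

def Spec_dismat (m1 : List (List (Int × Int))) (m2 : List (List (Int × Int))) (d1 : Int × Int) (out : String) : Prop := out = dismat_alt m1 m2 d1
instance (m1 : List (List (Int × Int))) (m2 : List (List (Int × Int))) (d1 : Int × Int) (out : String) : Decidable (Spec_dismat m1 m2 d1 out) := by unfold Spec_dismat; infer_instance

-- ===== CLAIM (what is proved, stated in full; the proofs are below) =====
def Claim_equal_dismat : Prop := ∀ (m1 : List (List (Int × Int))) (m2 : List (List (Int × Int))) (d1 : Int × Int), Dom_dismat m1 m2 d1 → Pre_dismat m1 m2 d1 → Spec_dismat m1 m2 d1 (dismat m1 m2 d1)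

-- ===== LEMMAS AND PROOFS =====

-- proof-side helper: the flat list of elementwise products, in A's (and B's) order
def allProds (m1 m2 : List (List (Int × Int))) (i j : Int) : List (Int × Int) :=
  (PySem.List.pyRange 0 j 1).flatMap
    (fun k => (PySem.List.pyRange 0 i 1).map
      (fun idx => multiplica (getCell m1 idx k) (getCell m2 k idx)))

-- flatMap congruence (pointwise) — small helper
theorem flatMap_congr_mem {α β : Type} {l : List α} {f g : α → List β}
    (h : ∀ a ∈ l, f a = g a) : l.flatMap f = l.flatMap g := by
  induction l with
  | nil => rfl
  | cons a l ih =>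
    simp only [List.flatMap_cons]
    rw [h a List.mem_cons_self, ih (fun x hx => h x (List.mem_cons_of_mem _ hx))]

theorem rowA_eq (m1 : List (List (Int × Int))) (x i y : Int) (f : List (Int × Int)) :
    rowA m1 x i y f = f ++ (PySem.List.pyRange y i 1).map (fun t => getCell m1 t x) := by
  generalize hn : (i - y).toNat = n
  induction n generalizing y f with
  | zero =>
    rw [rowA, PySem.List.pyRange_one_eq_nil (by omega)]
    simp
    omega
  | succ n ih =>
    rw [rowA]
    have hy : y < i := by omega
    rw [if_pos hy, ih (y + 1) _ (by omega), PySem.List.pyRange_one_cons hy]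
    simp

theorem transA_eq (m1 : List (List (Int × Int))) (i j x : Int) (acc : List (List (Int × Int))) :
    transA m1 i j x acc = acc ++ (PySem.List.pyRange x j 1).map (fun t => rowA m1 t i 0 []) := by
  generalize hn : (j - x).toNat = n
  induction n generalizing x acc with
  | zero =>
    rw [transA, PySem.List.pyRange_one_eq_nil (by omega)]
    simp
    omega
  | succ n ih =>
    rw [transA]
    have hx : x < j := by omega
    rw [if_pos hx, ih (x + 1) _ (by omega), PySem.List.pyRange_one_cons hx]
    simp

theorem collapse_nil : collapse [] = [] := by
  rw [collapse]
  simp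

theorem collapse_cons_append (a : Int × Int) (r m : List (Int × Int)) :
    collapse (a :: r ++ m) = collapse (r.foldl sumar a :: m) := by
  induction r generalizing a with
  | nil => simp
  | cons b r ih =>
    show collapse (a :: b :: (r ++ m)) = _
    rw [collapse]
    exact ih (sumar a b)

theorem collapse_cons (a : Int × Int) (r : List (Int × Int)) :
    collapse (a :: r) = [r.foldl sumar a] := by
  have h := collapse_cons_append a r []
  rw [List.append_nil] at h
  rw [h, collapse]
  simp

theorem collapse_collapse_append (s p : List (Int × Int)) :
    collapse (collapse s ++ p) = collapse (s ++ p) := by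
  cases s with
  | nil => rw [collapse_nil]
  | cons a r =>
    rw [collapse_cons]
    exact (collapse_cons_append a r p).symm

-- outer-loop shape: 'append the row's products, then collapse' folds to one collapse
theorem outer_loop_aux {α : Type} (prods : α → List (Int × Int))
    {f : List (Int × Int) → α → List (Int × Int)} (L : List α)
    (hf : ∀ t k, k ∈ L → f t k = collapse (t ++ prods k))
    (t : List (Int × Int)) (ht : collapse t = t) :
    L.foldl f t = collapse (t ++ L.flatMap prods) := by
  induction L generalizing t with
  | nil => simpa using ht.symm
  | cons k L ih =>
    simp only [List.foldl_cons, List.flatMap_cons]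
    rw [hf t k List.mem_cons_self,
      ih (fun t k hk => hf t k (List.mem_cons_of_mem _ hk)) (collapse (t ++ prods k))
        (by have := collapse_collapse_append (t ++ prods k) []; simpa using this),
      collapse_collapse_append, List.append_assoc]

theorem outer_loop {α : Type} (prods : α → List (Int × Int))
    {f : List (Int × Int) → α → List (Int × Int)} (L : List α)
    (hf : ∀ t k, k ∈ L → f t k = collapse (t ++ prods k)) :
    L.foldl f [] = collapse (L.flatMap prods) := by
  rw [outer_loop_aux prods L hf [] collapse_nil, List.nil_append]

-- reduce A's port to 'collapse of the flat product list'
theorem dismat_eq (m1 m2 : List (List (Int × Int))) (d1 : Int × Int) :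
    dismat m1 m2 d1 = bonito ((PySem.List.pyGet? (collapse (allProds m1 m2 d1.1 d1.2)) 0).getD (0, 0)) := by
  simp only [dismat]
  rw [transA_eq]
  set i := d1.1 with hi
  set j := d1.2 with hj
  set M := ([] : List (List (Int × Int))) ++ (PySem.List.pyRange 0 j 1).map (fun t => rowA m1 t i 0 []) with hM
  have hMlen : M.length = j.toNat := by
    simp [hM, PySem.List.length_pyRange_one]
  have hrow : ∀ k < j.toNat,
      (PySem.List.pyGet? M (k : Int)).getD []
        = (PySem.List.pyRange 0 i 1).map (fun t => getCell m1 t (k : Int)) := by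
    intro k hk
    rw [PySem.List.pyGet?_natCast]
    have hk' : k < M.length := by omega
    rw [List.getElem?_eq_getElem hk']
    simp only [hM, List.nil_append, Option.getD_some]
    rw [List.getElem_map, PySem.List.getElem_pyRange_one, rowA_eq]
    simp
  rw [outer_loop (fun (k : Nat) => (List.range i.toNat).map
      (fun (idx : Nat) => multiplica (getCell m1 (idx : Int) (k : Int)) (getCell m2 (k : Int) (idx : Int))))
      (List.range M.length) ?hf]
  case hf =>
    intro t k hk
    rw [List.mem_range, hMlen] at hk
    simp only [hrow k hk]
    congr 1
    rw [List.length_map, PySem.List.length_pyRange_one, PySem.List.foldl_append_singleton_eq_map]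
    congr 1
    simp only [Int.sub_zero]
    apply List.map_congr_left
    intro idx hidx
    rw [List.mem_range] at hidx
    rw [PySem.List.pyGet?_natCast, List.getElem?_eq_getElem (by
      simp only [List.length_map, PySem.List.length_pyRange_one, Int.sub_zero]; omega)]
    rw [List.getElem_map, PySem.List.getElem_pyRange_one]
    simp
  rw [hMlen]
  have hflat : allProds m1 m2 i j
      = (List.range j.toNat).flatMap (fun (k : Nat) => (List.range i.toNat).map
          (fun (idx : Nat) => multiplica (getCell m1 (idx : Int) (k : Int)) (getCell m2 (k : Int) (idx : Int)))) := by
    unfold allProds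
    rw [PySem.List.pyRange_one 0 j, List.flatMap_map]
    simp only [Int.sub_zero]
    apply flatMap_congr_mem
    intro k hk
    rw [PySem.List.pyRange_one 0 i, List.map_map]
    simp [Function.comp_def]
  rw [← hflat]

-- reduce B's port to the same normal form
theorem dismat_alt_eq (m1 m2 : List (List (Int × Int))) (d1 : Int × Int) :
    dismat_alt m1 m2 d1 = bonito ((PySem.List.pyGet? (collapse (allProds m1 m2 d1.1 d1.2)) 0).getD (0, 0)) := by
  simp only [dismat_alt]
  rw [PySem.List.slice_from_one]
  cases hap : (PySem.List.pyRange 0 d1.2 1).flatMap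
      (fun k => (PySem.List.pyRange 0 d1.1 1).map
        (fun idx => multiplica (getCell m1 idx k) (getCell m2 k idx))) with
  | nil =>
    have : allProds m1 m2 d1.1 d1.2 = [] := hap
    rw [this, collapse_nil]
    simp
  | cons a r =>
    have : allProds m1 m2 d1.1 d1.2 = a :: r := hap
    rw [this, collapse_cons]
    simp

-- ===== VERDICT (by name: the statement is the Claim_ definition above) =====
theorem dismat_spec : Claim_equal_dismat := by
  intro m1 m2 d1 _ _
  unfold Spec_dismat
  rw [dismat_eq, dismat_alt_eq]
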